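-- pv_equiv track=rewrite | github.com/Cosmic-Stars-Team/Cosmic-Stars-Prototype | src/far_field_lut_baker.py | _build_column_chunks
-- ===== SOURCE A (Python) =====
-- def _build_column_chunks(width: int, workers: int) -> list[tuple[int, int]]:
--     chunk_count = min(width, workers)
--     base = width // chunk_count
--     remainder = width % chunk_count
--     chunks: list[tuple[int, int]] = []
--     start = 0
--     for i in range(chunk_count):
--         stop = start + base + (1 if i < remainder else 0)
--         chunks.append((start, stop))
--         start = stop
--     return chunks
-- ===== SOURCE B (Python) =====
-- def _build_column_chunks(width: int, workers: int) -> list[tuple[int, int]]: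
--     chunk_count = min(width, workers)
--     base = width // chunk_count
--     remainder = width % chunk_count
--     return [(i * base + min(i, remainder), (i + 1) * base + min(i + 1, remainder))
--             for i in range(chunk_count)]
-- ===== Notes on version B (the rewrite author's own statement) =====
-- stated objective: alternative
-- what changed: Replaces the loop-carried running start accumulator with a closed-form boundary formula per index (i*base + min(i, remainder)), turning the stateful loop into a stateless comprehension.
import Mathlib
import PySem

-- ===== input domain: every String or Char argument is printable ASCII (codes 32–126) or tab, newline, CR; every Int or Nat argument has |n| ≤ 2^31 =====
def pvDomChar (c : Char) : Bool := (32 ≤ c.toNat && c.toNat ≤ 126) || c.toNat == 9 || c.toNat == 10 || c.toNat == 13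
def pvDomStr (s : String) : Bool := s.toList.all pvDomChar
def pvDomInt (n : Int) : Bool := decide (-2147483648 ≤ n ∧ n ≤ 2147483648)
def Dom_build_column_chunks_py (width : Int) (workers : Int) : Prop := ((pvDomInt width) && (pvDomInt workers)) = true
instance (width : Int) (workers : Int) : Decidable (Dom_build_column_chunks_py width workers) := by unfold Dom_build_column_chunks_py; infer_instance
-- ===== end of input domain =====

-- B replaces the loop-carried running `start` accumulator with a closed-form
-- per-index boundary formula (stateless map); same cost, different decomposition.


-- ===== PORT A =====
-- literal transliteration: running `start`, append (start, stop) each iteration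
def build_column_chunks_py (width : Int) (workers : Int) : List (Int × Int) :=
  let chunk_count := min width workers
  let base := PySem.Int.floordiv width chunk_count
  let remainder := PySem.Int.mod width chunk_count
  let res := (PySem.List.pyRange 0 chunk_count 1).foldl
    (fun (st : List (Int × Int) × Int) i =>
      let stop := st.2 + base + (if i < remainder then (1 : Int) else 0)
      (st.1 ++ [(st.2, stop)], stop))
    ([], 0)
  res.1

-- ===== PORT B =====
-- closed-form boundaries: chunk i is (i*base + min i r, (i+1)*base + min (i+1) r)
def build_column_chunks_py_alt (width : Int) (workers : Int) : List (Int × Int) :=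
  let chunk_count := min width workers
  let base := PySem.Int.floordiv width chunk_count
  let remainder := PySem.Int.mod width chunk_count
  (PySem.List.pyRange 0 chunk_count 1).map
    (fun i => (i * base + min i remainder, (i + 1) * base + min (i + 1) remainder))

-- ===== PRECONDITION & SPEC =====
-- Pre_ excludes min(width, workers) = 0, where Python A raises ZeroDivisionError.
def Pre_build_column_chunks_py (width : Int) (workers : Int) : Prop := min width workers ≠ 0
instance (width : Int) (workers : Int) : Decidable (Pre_build_column_chunks_py width workers) := by unfold Pre_build_column_chunks_py; infer_instance
def pvWitness_build_column_chunks_py : Int × Int := (10, 3)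

def Spec_build_column_chunks_py (width : Int) (workers : Int) (out : List (Int × Int)) : Prop := out = build_column_chunks_py_alt width workers
instance (width : Int) (workers : Int) (out : List (Int × Int)) : Decidable (Spec_build_column_chunks_py width workers out) := by unfold Spec_build_column_chunks_py; infer_instance

-- ===== CLAIM (what is proved, stated in full; the proofs are below) =====
def Claim_equal_build_column_chunks_py : Prop := ∀ (width : Int) (workers : Int), Dom_build_column_chunks_py width workers → Pre_build_column_chunks_py width workers → Spec_build_column_chunks_py width workers (build_column_chunks_py width workers)

-- ===== LEMMAS AND PROOFS =====

-- loop invariant: starting the fold at offset a*base + min a r, the fold over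
-- pyRange a (a+k) 1 appends exactly the closed-form chunks of B
theorem chunks_loop (base r : Int) : ∀ (k : Nat) (a : Int) (acc : List (Int × Int)),
    ((PySem.List.pyRange a (a + k) 1).foldl
      (fun (st : List (Int × Int) × Int) i =>
        let stop := st.2 + base + (if i < r then (1 : Int) else 0)
        (st.1 ++ [(st.2, stop)], stop))
      (acc, a * base + min a r)).1
    = acc ++ (PySem.List.pyRange a (a + k) 1).map
        (fun i => (i * base + min i r, (i + 1) * base + min (i + 1) r)) := by
  intro k
  induction k with
  | zero =>
    intro a acc
    rw [PySem.List.pyRange_one_eq_nil (by omega)]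
    simp
  | succ k ih =>
    intro a acc
    rw [PySem.List.pyRange_one_cons (by omega : a < a + (k + 1 : Nat))]
    simp only [List.foldl_cons, List.map_cons]
    have hmin : min a r + (if a < r then (1 : Int) else 0) = min (a + 1) r := by
      split_ifs with h <;> omega
    have hstop : a * base + min a r + base + (if a < r then (1 : Int) else 0)
        = (a + 1) * base + min (a + 1) r := by
      rw [← hmin]; ring
    have ha : a + (k + 1 : Nat) = (a + 1) + (k : Nat) := by push_cast; ring
    rw [hstop, ha]
    rw [ih (a + 1) (acc ++ [(a * base + min a r, (a + 1) * base + min (a + 1) r)])]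
    simp

-- ===== VERDICT (by name: the statement is the Claim_ definition above) =====
theorem build_column_chunks_py_spec : Claim_equal_build_column_chunks_py := by
  intro width workers _ hpre
  unfold Spec_build_column_chunks_py build_column_chunks_py build_column_chunks_py_alt
  simp only []
  set n := min width workers with hn
  rcases lt_trichotomy n 0 with hneg | hzero | hpos
  · rw [PySem.List.pyRange_one_eq_nil (by omega)]
    simp
  · exact absurd hzero hpre
  · have hr : 0 ≤ PySem.Int.mod width n := by
      rw [PySem.Int.mod_eq_emod_of_pos hpos]
      exact Int.emod_nonneg _ (by omega)
    have key := chunks_loop (PySem.Int.floordiv width n) (PySem.Int.mod width n) n.toNat 0 []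
    simp only [List.nil_append, zero_mul, zero_add, min_eq_left hr,
      show (0 : Int) + (n.toNat : Int) = n from by omega] at key
    exact key
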